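-- pv_equiv track=rewrite | github.com/913-Herta-Diana/Fundamentals-Programming | A1/A1_1.py | min_formed_with_digits
-- ===== SOURCE A (Python) =====
-- def min_formed_with_digits(n):
--     if n==0:
--         return 0;
--     v=[0,0,0,0,0,0,0,0,0,0]
--     m=0
--     while n!=0:
--         v[n%10]+=1
--         n//=10
--     cif=1
--     while(v[cif]==0):
--         cif+=1
--     m=cif
--     v[m]-=1
--     for i in range(len(v)):
--         for j in range(v[i]):
--             m=m*10+i
--     return m
-- ===== SOURCE B (Python) =====
-- def min_formed_with_digits(n):
--     if n == 0:
--         return 0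
--     digits = []
--     while n != 0:
--         digits.append(n % 10)
--         n //= 10
--     nonzeros = sorted(d for d in digits if d != 0)
--     m = nonzeros[0]
--     for _ in range(digits.count(0)):
--         m = m * 10
--     for d in nonzeros[1:]:
--         m = m * 10 + d
--     return m
-- ===== Notes on version B (the rewrite author's own statement) =====
-- stated objective: simpler
-- what changed: replaces the fixed digit-count array with its counting-sort expansion (find-first-nonzero scan plus nested count-replication loops) by collecting the digits into a list, sorting the nonzero ones, leading with the smallest nonzero digit, appending the zero digits and folding the rest
import Mathlib
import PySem

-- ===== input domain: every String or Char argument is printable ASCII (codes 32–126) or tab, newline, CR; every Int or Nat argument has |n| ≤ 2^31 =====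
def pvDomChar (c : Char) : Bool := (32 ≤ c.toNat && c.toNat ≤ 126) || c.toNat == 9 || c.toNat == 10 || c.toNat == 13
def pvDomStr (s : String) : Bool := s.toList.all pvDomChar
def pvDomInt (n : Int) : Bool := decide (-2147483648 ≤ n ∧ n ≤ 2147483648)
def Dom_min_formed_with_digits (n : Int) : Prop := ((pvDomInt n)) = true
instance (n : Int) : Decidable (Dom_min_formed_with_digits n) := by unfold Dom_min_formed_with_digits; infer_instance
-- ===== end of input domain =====

-- B builds the result from a sorted digit list (smallest nonzero digit first, then zeros, then
-- the remaining nonzero digits) instead of A's 10-bucket count array with its find-first-nonzero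
-- scan and nested count-replication loops; same return value on every n ≥ 0 (Pre_).


-- ===== PORT A =====
-- while n != 0: v[n%10] += 1; n //= 10   (runs on n.toNat: Python diverges for n < 0, which
-- Pre_ excludes; for n ≥ 0 Nat % and / coincide with Python's % and //)
def pvCountLoop (n : Nat) (v : List Int) : List Int :=
  if h : n = 0 then v
  else pvCountLoop (n / 10) (v.set (n % 10) (v.getD (n % 10) 0 + 1))
  termination_by n
  decreasing_by exact Nat.div_lt_self (Nat.pos_of_ne_zero h) (by norm_num)

-- while v[cif] == 0: cif += 1   (the cif < 10 guard only makes the loop total; inside Pre_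
-- a nonzero digit exists, so Python never indexes out of range)
def pvFindCif (v : List Int) (cif : Nat) : Nat :=
  if h : cif < 10 then (if v.getD cif 0 = 0 then pvFindCif v (cif + 1) else cif) else cif
  termination_by 10 - cif

def min_formed_with_digits (n : Int) : Int :=
  if n = 0 then 0
  else
    let v := pvCountLoop n.toNat [0, 0, 0, 0, 0, 0, 0, 0, 0, 0]
    let cif := pvFindCif v 1
    let m : Int := (cif : Int)
    let v' := v.set cif (v.getD cif 0 - 1)
    -- for i in range(len(v)): for j in range(v[i]): m = m*10 + i
    (List.range 10).foldl
      (fun m i => (List.range (v'.getD i 0).toNat).foldl (fun m _ => m * 10 + (i : Int)) m) m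

-- ===== PORT B =====
-- digits = []; while n != 0: digits.append(n % 10); n //= 10   (same n ≥ 0 note as for A)
def pvDigits (n : Nat) : List Int :=
  if h : n = 0 then [] else ((n % 10 : Nat) : Int) :: pvDigits (n / 10)
  termination_by n
  decreasing_by exact Nat.div_lt_self (Nat.pos_of_ne_zero h) (by norm_num)

def min_formed_with_digits_alt (n : Int) : Int :=
  if n = 0 then 0
  else
    let digits := pvDigits n.toNat
    let nonzeros := PySem.List.sorted (digits.filter (fun d => d != 0)) (fun x => x) false
    let m := nonzeros.headD 0   -- nonzeros[0]: nonempty for every n > 0 inside Pre_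
    let m := (List.range (digits.count 0)).foldl (fun m _ => m * 10) m
    (nonzeros.drop 1).foldl (fun m d => m * 10 + d) m   -- for d in nonzeros[1:]

-- ===== PRECONDITION & SPEC =====
-- Pre_ excludes n < 0, on which the Python while-loop of A (and of B) never terminates.
def Pre_min_formed_with_digits (n : Int) : Prop := 0 ≤ n
instance (n : Int) : Decidable (Pre_min_formed_with_digits n) := by
  unfold Pre_min_formed_with_digits; infer_instance

def pvWitness_min_formed_with_digits : Int := 3020

def Spec_min_formed_with_digits (n : Int) (out : Int) : Prop := out = min_formed_with_digits_alt n
instance (n : Int) (out : Int) : Decidable (Spec_min_formed_with_digits n out) := by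
  unfold Spec_min_formed_with_digits; infer_instance

-- ===== CLAIM (what is proved, stated in full; the proofs are below) =====
def Claim_equal_min_formed_with_digits : Prop :=
  ∀ (n : Int), Dom_min_formed_with_digits n → Pre_min_formed_with_digits n →
    Spec_min_formed_with_digits n (min_formed_with_digits n)

-- ===== LEMMAS AND PROOFS =====

-- the counting-sort expansion of the count vector v, digits k..9 in ascending order
def pvExpand (k : Nat) (v : List Int) : List Int :=
  (List.range' k (10 - k)).flatMap (fun i => List.replicate (v.getD i 0).toNat (i : Int))

lemma pvExpand_cons (k : Nat) (v : List Int) (hk : k < 10) :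
    pvExpand k v = List.replicate (v.getD k 0).toNat (k : Int) ++ pvExpand (k + 1) v := by
  unfold pvExpand
  have h : 10 - k = (10 - (k + 1)) + 1 := by omega
  rw [h, List.range'_succ]
  simp

lemma mem_pvExpand (k : Nat) (v : List Int) (x : Int) (hx : x ∈ pvExpand k v) :
    ∃ j : Nat, k ≤ j ∧ j < 10 ∧ x = (j : Int) := by
  unfold pvExpand at hx
  obtain ⟨i, hi, hxi⟩ := List.mem_flatMap.1 hx
  rw [List.mem_range'_1] at hi
  exact ⟨i, hi.1, by omega, List.eq_of_mem_replicate hxi⟩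

lemma pvExpand_count_eq_zero (k : Nat) (v : List Int) (a : Int)
    (h : ∀ j : Nat, k ≤ j → j < 10 → a ≠ (j : Int)) : List.count a (pvExpand k v) = 0 := by
  rw [List.count_eq_zero]
  intro hm
  obtain ⟨j, h1, h2, h3⟩ := mem_pvExpand k v a hm
  exact h j h1 h2 h3

lemma pvExpand_count (v : List Int) :
    ∀ d k j : Nat, 10 - k = d → k ≤ j → j < 10 →
      List.count ((j : Nat) : Int) (pvExpand k v) = (v.getD j 0).toNat := by
  intro d
  induction d with
  | zero => intro k j hd hkj hj; omega
  | succ d ih =>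
    intro k j hd hkj hj
    rw [pvExpand_cons k v (by omega), List.count_append, List.count_replicate]
    rcases Nat.eq_or_lt_of_le hkj with h | h
    · subst h
      rw [if_pos (by simp), pvExpand_count_eq_zero (k + 1) v _ ?_]
      · omega
      · intro j' h1 _ h3
        have hkj' : k = j' := by exact_mod_cast h3
        omega
    · rw [if_neg (by simp; omega), ih (k + 1) j (by omega) (by omega) hj]
      omega

lemma pvExpand_pairwise (v : List Int) :
    ∀ d k : Nat, 10 - k = d → (pvExpand k v).Pairwise (· ≤ ·) := by
  intro d
  induction d with
  | zero => intro k hd; unfold pvExpand; rw [show 10 - k = 0 from hd]; simp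
  | succ d ih =>
    intro k hd
    rw [pvExpand_cons k v (by omega)]
    rw [List.pairwise_append]
    refine ⟨List.pairwise_replicate.2 (by simp), ih (k + 1) (by omega), ?_⟩
    intro x hx y hy
    have hx' := List.eq_of_mem_replicate hx
    obtain ⟨j, h1, _, h3⟩ := mem_pvExpand (k + 1) v y hy
    subst hx'; subst h3
    exact_mod_cast Nat.le_of_lt (by omega)

lemma pvExpand_congr (k : Nat) (v w : List Int)
    (h : ∀ j : Nat, k ≤ j → j < 10 → v.getD j 0 = w.getD j 0) : pvExpand k v = pvExpand k w := by
  unfold pvExpand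
  simp only [List.flatMap]
  congr 1
  apply List.map_congr_left
  intro i hi
  rw [List.mem_range'_1] at hi
  rw [h i hi.1 (by omega)]

lemma pvExpand_skip (v : List Int) :
    ∀ d k c : Nat, c - k = d → k ≤ c → c ≤ 10 →
      (∀ j : Nat, k ≤ j → j < c → v.getD j 0 = 0) → pvExpand k v = pvExpand c v := by
  intro d
  induction d with
  | zero =>
    intro k c hd h1 h2 _
    have he : k = c := by omega
    rw [he]
  | succ d ih =>
    intro k c hd h1 h2 hz
    have hk : k < 10 := by omega
    rw [pvExpand_cons k v hk, hz k le_rfl (by omega)]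
    simp only [Int.toNat_zero, List.replicate_zero, List.nil_append]
    exact ih (k + 1) c (by omega) (by omega) h2 (fun j hj1 hj2 => hz j (by omega) hj2)

lemma pvGetD_set (l : List Int) (i j : Nat) (a : Int) (hi : i < l.length) :
    (l.set i a).getD j 0 = if i = j then a else l.getD j 0 := by
  by_cases h : i = j
  · subst h; rw [if_pos rfl]
    rw [List.getD_eq_getElem?_getD, List.getElem?_set_self (by omega)]
    simp
  · rw [if_neg h, List.getD_eq_getElem?_getD, List.getD_eq_getElem?_getD, List.getElem?_set_ne h]

lemma pvCountLoop_length (n : Nat) (v : List Int) : (pvCountLoop n v).length = v.length := by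
  fun_induction pvCountLoop n v with
  | case1 => rfl
  | case2 n v h ih => rw [ih, List.length_set]

lemma pvCountLoop_getD (n : Nat) (v : List Int) (j : Nat) (hj : j < 10) (hv : v.length = 10) :
    (pvCountLoop n v).getD j 0 = v.getD j 0 + ((pvDigits n).count ((j : Nat) : Int) : Int) := by
  fun_induction pvCountLoop n v with
  | case1 v =>
    rw [pvDigits]
    simp
  | case2 n v h ih =>
    rw [ih (by rw [List.length_set]; exact hv)]
    conv_rhs => rw [pvDigits]
    rw [dif_neg h, List.count_cons]
    rw [pvGetD_set v (n % 10) j _ (by rw [hv]; exact Nat.mod_lt n (by norm_num))]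
    by_cases hej : n % 10 = j
    · subst hej
      rw [if_pos rfl, if_pos (by simp)]
      push_cast
      ring
    · rw [if_neg hej, if_neg (by simp; exact_mod_cast fun hc => hej (by exact_mod_cast hc))]
      push_cast; ring

lemma mem_pvDigits (n : Nat) (x : Int) (hx : x ∈ pvDigits n) : 0 ≤ x ∧ x < 10 := by
  fun_induction pvDigits n with
  | case1 => simp at hx
  | case2 n h ih =>
    rcases List.mem_cons.1 hx with h1 | h1
    · subst h1
      constructor
      · exact_mod_cast Nat.zero_le _
      · exact_mod_cast Nat.mod_lt n (by norm_num)
    · exact ih h1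

lemma pvDigits_exists_nonzero (n : Nat) (hn : n ≠ 0) :
    ∃ j : Nat, 1 ≤ j ∧ j < 10 ∧ (pvDigits n).count ((j : Nat) : Int) ≠ 0 := by
  fun_induction pvDigits n with
  | case1 => omega
  | case2 n h ih =>
    by_cases hr : n % 10 = 0
    · have hq : n / 10 ≠ 0 := by omega
      obtain ⟨j, h1, h2, h3⟩ := ih hq
      refine ⟨j, h1, h2, ?_⟩
      rw [List.count_cons]
      omega
    · refine ⟨n % 10, by omega, Nat.mod_lt n (by norm_num), ?_⟩
      rw [List.count_cons, if_pos (beq_self_eq_true _)]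
      omega

lemma pvFindCif_spec (v : List Int) : ∀ k : Nat,
    (∃ j : Nat, k ≤ j ∧ j < 10 ∧ v.getD j 0 ≠ 0) →
    k ≤ pvFindCif v k ∧ pvFindCif v k < 10 ∧ v.getD (pvFindCif v k) 0 ≠ 0 ∧
      ∀ j : Nat, k ≤ j → j < pvFindCif v k → v.getD j 0 = 0 := by
  intro k
  fun_induction pvFindCif v k with
  | case1 k hk hz ih =>
    intro ⟨j, h1, h2, h3⟩
    have hjk : j ≠ k := fun he => h3 (he ▸ hz)
    obtain ⟨i1, i2, i3, i4⟩ := ih ⟨j, by omega, h2, h3⟩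
    refine ⟨by omega, i2, i3, ?_⟩
    intro j' hj1 hj2
    rcases Nat.eq_or_lt_of_le hj1 with he | hlt
    · exact he ▸ hz
    · exact i4 j' hlt hj2
  | case2 k hk hz => exact fun _ => ⟨le_rfl, hk, hz, fun j h1 h2 => by omega⟩
  | case3 k hk => intro ⟨j, h1, h2, _⟩; omega

lemma pvFoldl_const_mul (c : Nat) (a m0 : Int) :
    (List.range c).foldl (fun m _ => m * 10 + a) m0 =
      (List.replicate c a).foldl (fun m d => m * 10 + d) m0 := by
  induction c with
  | zero => rfl
  | succ c ih =>
    rw [List.range_succ, List.replicate_succ', List.foldl_append, List.foldl_append, ih]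
    simp

lemma pvFoldl_mul10 (c : Nat) (m0 : Int) :
    (List.range c).foldl (fun m _ => m * 10) m0 =
      (List.replicate c (0 : Int)).foldl (fun m d => m * 10 + d) m0 := by
  induction c with
  | zero => rfl
  | succ c ih =>
    rw [List.range_succ, List.replicate_succ', List.foldl_append, List.foldl_append, ih]
    simp

lemma pvFoldl_nested (l : List Nat) (v : List Int) (m0 : Int) :
    l.foldl (fun m i => (List.range (v.getD i 0).toNat).foldl (fun m _ => m * 10 + (i : Int)) m) m0
      = (l.flatMap (fun i => List.replicate (v.getD i 0).toNat (i : Int))).foldl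
          (fun m d => m * 10 + d) m0 := by
  induction l generalizing m0 with
  | nil => rfl
  | cons x xs ih => rw [List.foldl_cons, List.flatMap_cons, List.foldl_append, ih, pvFoldl_const_mul]


-- ===== VERDICT (by name: the statement is the Claim_ definition above) =====
theorem min_formed_with_digits_spec : Claim_equal_min_formed_with_digits := by
  intro n _ hpre
  have hpre' : (0 : Int) ≤ n := hpre
  unfold Spec_min_formed_with_digits
  by_cases hn : n = 0
  · rw [hn]; rfl
  · have hN : n.toNat ≠ 0 := by omega
    simp only [min_formed_with_digits, min_formed_with_digits_alt, if_neg hn]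
    set vc := pvCountLoop n.toNat [0, 0, 0, 0, 0, 0, 0, 0, 0, 0] with hvc
    have hlen : vc.length = 10 := by rw [hvc, pvCountLoop_length]; rfl
    have hget : ∀ j : Nat, j < 10 → vc.getD j 0 = ((pvDigits n.toNat).count ((j : Nat) : Int) : Int) := by
      intro j hj
      rw [hvc, pvCountLoop_getD n.toNat _ j hj rfl]
      have hz10 : ([0, 0, 0, 0, 0, 0, 0, 0, 0, 0] : List Int).getD j 0 = 0 := by
        interval_cases j <;> rfl
      rw [hz10, zero_add]
    obtain ⟨j0, hj1, hj9, hj0c⟩ := pvDigits_exists_nonzero n.toNat hN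
    have hex : ∃ j : Nat, 1 ≤ j ∧ j < 10 ∧ vc.getD j 0 ≠ 0 :=
      ⟨j0, hj1, hj9, by rw [hget j0 hj9]; exact_mod_cast hj0c⟩
    obtain ⟨hc1, hc9, hcnz, hcz⟩ := pvFindCif_spec vc 1 hex
    set cif := pvFindCif vc 1 with hcifd
    set cN := (pvDigits n.toNat).count ((cif : Nat) : Int) with hcNd
    have hvcc : vc.getD cif 0 = (cN : Int) := hget cif hc9
    have hcN1 : 1 ≤ cN := by
      rw [hvcc] at hcnz
      omega
    set v' := vc.set cif (vc.getD cif 0 - 1) with hv'd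
    have hv'get : ∀ j : Nat, j < 10 → v'.getD j 0 = if cif = j then (cN : Int) - 1 else vc.getD j 0 := by
      intro j hj
      rw [hv'd, pvGetD_set vc cif j _ (by omega), hvcc]
    set z := (pvDigits n.toNat).count (0 : Int) with hzd
    -- A side: nested count loops = fold over the expansion of v'
    rw [pvFoldl_nested (List.range 10) v' _]
    have hErange : (List.range 10).flatMap
        (fun i => List.replicate ((v'.getD i 0).toNat) ((i : Nat) : Int)) = pvExpand 0 v' := by
      unfold pvExpand
      rw [List.range_eq_range']
    rw [hErange]
    have e1 : pvExpand 0 v' = List.replicate z (0 : Int) ++ pvExpand 1 v' := by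
      rw [pvExpand_cons 0 v' (by norm_num)]
      rw [hv'get 0 (by norm_num), if_neg (by omega)]
      rw [hget 0 (by norm_num)]
      norm_num
      rw [hzd]
    have e2 : pvExpand 1 v' = pvExpand cif v' := by
      apply pvExpand_skip v' (cif - 1) 1 cif (by omega) hc1 (by omega)
      intro j hj1 hj2
      rw [hv'get j (by omega), if_neg (by omega)]
      exact hcz j hj1 hj2
    have e3 : pvExpand cif v' = List.replicate (cN - 1) ((cif : Nat) : Int) ++ pvExpand (cif + 1) v' := by
      rw [pvExpand_cons cif v' hc9, hv'get cif hc9, if_pos rfl]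
      congr 1
      rw [show ((cN : Int) - 1) = ((cN - 1 : Nat) : Int) from by omega, Int.toNat_natCast]
    have e4 : pvExpand (cif + 1) v' = pvExpand (cif + 1) vc := by
      apply pvExpand_congr
      intro j hj1 hj2
      rw [hv'get j hj2, if_neg (by omega)]
    -- B side: the sorted nonzero digits are the expansion of vc from 1
    have hnz : PySem.List.sorted ((pvDigits n.toNat).filter (fun d => d != 0)) (fun x => x) false
        = pvExpand 1 vc := by
      apply PySem.List.sorted_id_eq_of_perm_of_pairwise
      · rw [List.perm_iff_count]
        intro a
        by_cases ha : ∃ j : Nat, 1 ≤ j ∧ j < 10 ∧ a = ((j : Nat) : Int)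
        · obtain ⟨j, h1, h2, rfl⟩ := ha
          rw [pvExpand_count vc 9 1 j (by norm_num) h1 h2, hget j h2, Int.toNat_natCast]
          rw [List.count_filter (by simp; omega)]
        · rw [pvExpand_count_eq_zero 1 vc a
            (fun j hj1 hj2 he => ha ⟨j, hj1, hj2, he⟩)]
          symm
          rw [List.count_eq_zero]
          intro hm
          have hmem := List.mem_of_mem_filter hm
          have hb := mem_pvDigits n.toNat a hmem
          have hne := List.of_mem_filter hm
          simp only [bne_iff_ne, ne_eq] at hne
          exact ha ⟨a.toNat, by omega, by omega, by omega⟩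
      · exact pvExpand_pairwise vc 9 1 (by norm_num)
    have hnz2 : pvExpand 1 vc
        = ((cif : Nat) : Int) :: (List.replicate (cN - 1) ((cif : Nat) : Int) ++ pvExpand (cif + 1) vc) := by
      rw [pvExpand_skip vc (cif - 1) 1 cif (by omega) hc1 (by omega) hcz]
      rw [pvExpand_cons cif vc hc9, hvcc, Int.toNat_natCast]
      conv_lhs => rw [show cN = (cN - 1) + 1 from by omega, List.replicate_succ]
      rw [List.cons_append]
    rw [hnz, hnz2]
    simp only [List.headD_cons, List.drop_succ_cons, List.drop_zero]
    rw [pvFoldl_mul10, ← List.foldl_append, e1, e2, e3, e4]
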